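-- pv_equiv track=rewrite | github.com/ZayJob/EPAM-Python | session2/task_2_4.py | clear_array
-- ===== SOURCE A (Python) =====
-- def clear_array(array, lenght):
--     temp = 0
--     answer = [0,lenght]
--     i = 0
--     while (i < len(array)):
--         if array[i] <= lenght and array[i] >= temp:
--             temp = array[i]
--             answer.insert(1,array[i])
--         i += 1
--     return list(sorted(set(answer)))
-- ===== SOURCE B (Python) =====
-- def clear_array(array, lenght):
--     # Declarative characterization: a value belongs to the answer iff it is 0,
--     # lenght, or an element x of the filtered list f = [v <= lenght] that is
--     # nonnegative and at least every element before it in f (a left-to-right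
--     # maximum).  No running accumulator; each element is tested against its
--     # whole prefix.
--     f = [v for v in array if v <= lenght]
--     keep = {x for i, x in enumerate(f) if x >= 0 and all(y <= x for y in f[:i])}
--     return sorted(keep | {0, lenght})
-- ===== Notes on version B (the rewrite author's own statement) =====
-- stated objective: alternative
-- what changed: Replaces A's stateful scan (running maximum temp plus answer.insert(1,..) and a final set+sort) by a stateless declarative characterization: filter to values <= lenght, keep exactly the nonnegative left-to-right maxima of that list via a per-element brute-force prefix test, union with {0, lenght} and sort; no accumulator is threaded through the traversal.
import Mathlib
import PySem

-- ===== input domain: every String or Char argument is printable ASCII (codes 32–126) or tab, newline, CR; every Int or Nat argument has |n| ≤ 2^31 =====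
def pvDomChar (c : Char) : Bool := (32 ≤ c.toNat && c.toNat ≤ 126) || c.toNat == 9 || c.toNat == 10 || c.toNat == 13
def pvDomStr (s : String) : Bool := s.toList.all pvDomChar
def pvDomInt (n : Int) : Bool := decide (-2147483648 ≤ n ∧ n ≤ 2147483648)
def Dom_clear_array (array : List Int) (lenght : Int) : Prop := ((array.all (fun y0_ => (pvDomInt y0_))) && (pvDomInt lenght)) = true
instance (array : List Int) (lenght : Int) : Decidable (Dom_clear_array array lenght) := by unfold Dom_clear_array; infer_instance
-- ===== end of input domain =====

-- B replaces A's stateful running-maximum scan by a stateless characterization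
-- (filter, then keep each nonnegative element that dominates its whole prefix);
-- equivalence of the RETURN value is proved (A does not mutate its arguments).

-- ===== PORT A =====
-- while over indices = fold over the elements in order; state (temp, answer)
def clear_array (array : List Int) (lenght : Int) : List Int :=
  let st := array.foldl
    (fun (st : Int × List Int) x =>
      if x ≤ lenght ∧ st.1 ≤ x then (x, PySem.List.insert st.2 1 x) else st)
    (0, [0, lenght])
  PySem.List.sorted (PySem.Set.ofList st.2) (fun y => y) false

-- ===== PORT B =====
-- f[:i] with enumerate index i ≥ 0 is exactly List.take i.toNat
def clear_array_alt (array : List Int) (lenght : Int) : List Int :=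
  let f := array.filter (fun v => decide (v ≤ lenght))
  let keeps := ((PySem.List.enumerate f).filter
      (fun p => decide (0 ≤ p.2) && decide (∀ y ∈ f.take p.1.toNat, y ≤ p.2))).map Prod.snd
  PySem.List.sorted (PySem.Set.union (PySem.Set.ofList keeps) [0, lenght]) (fun y => y) false

-- ===== PRECONDITION & SPEC =====
def Spec_clear_array (array : List Int) (lenght : Int) (out : List Int) : Prop := out = clear_array_alt array lenght
instance (array : List Int) (lenght : Int) (out : List Int) : Decidable (Spec_clear_array array lenght out) := by unfold Spec_clear_array; infer_instance

-- ===== CLAIM (what is proved, stated in full; the proofs are below) =====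
def Claim_equal_clear_array : Prop := ∀ (array : List Int) (lenght : Int), Dom_clear_array array lenght → Spec_clear_array array lenght (clear_array array lenght)

-- ===== LEMMAS AND PROOFS =====

-- the values A's loop collects: left-to-right maxima of g starting from bound temp
def pvKeep (temp : Int) : List Int → List Int
  | [] => []
  | x :: t => if temp ≤ x then x :: pvKeep x t else pvKeep temp t

-- closed-form membership for pvKeep: an element at index i that is ≥ temp and ≥ its whole prefix
theorem mem_pvKeep (g : List Int) : ∀ (temp z : Int),
    z ∈ pvKeep temp g ↔ ∃ (i : Nat) (h : i < g.length), g[i] = z ∧ temp ≤ z ∧ ∀ y ∈ g.take i, y ≤ z := by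
  induction g with
  | nil => intro temp z; simp [pvKeep]
  | cons x t ih =>
    intro temp z
    by_cases hx : temp ≤ x
    · simp only [pvKeep, if_pos hx, List.mem_cons, ih x z]
      constructor
      · rintro (rfl | ⟨i, h, hg, hle, hpre⟩)
        · exact ⟨0, by simp, by simp, hx, by simp⟩
        · refine ⟨i + 1, by simpa using h, by simpa using hg, le_trans hx hle, ?_⟩
          intro y hy
          simp only [List.take_succ_cons, List.mem_cons] at hy
          rcases hy with rfl | hy
          · exact hle
          · exact hpre y hy
      · rintro ⟨i, h, hg, hle, hpre⟩
        cases i with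
        | zero => left; simp at hg; omega
        | succ j =>
          right
          refine ⟨j, by simpa using h, by simpa using hg, ?_, ?_⟩
          · exact hpre x (by simp)
          · intro y hy
            exact hpre y (by simp [List.take_succ_cons]; exact Or.inr hy)
    · simp only [pvKeep, if_neg hx, ih temp z]
      constructor
      · rintro ⟨i, h, hg, hle, hpre⟩
        refine ⟨i + 1, by simpa using h, by simpa using hg, hle, ?_⟩
        intro y hy
        simp only [List.take_succ_cons, List.mem_cons] at hy
        rcases hy with rfl | hy
        · omega
        · exact hpre y hy
      · rintro ⟨i, h, hg, hle, hpre⟩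
        cases i with
        | zero => exfalso; simp at hg; omega
        | succ j =>
          refine ⟨j, by simpa using h, by simpa using hg, hle, ?_⟩
          intro y hy
          exact hpre y (by simp [List.take_succ_cons]; exact Or.inr hy)

-- membership through answer.insert(1, v) (answer is never empty: it starts [0, lenght])
theorem mem_insert_one (xs : List Int) (v y : Int) (h : xs ≠ []) :
    y ∈ PySem.List.insert xs (1 : Int) v ↔ y = v ∨ y ∈ xs := by
  have hlen : 1 ≤ xs.length := by
    cases xs with
    | nil => exact absurd rfl h
    | cons a t => simp
  rw [show ((1 : Int)) = ((1 : Nat) : Int) by norm_num,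
      PySem.List.insert_natCast xs 1 v hlen]
  constructor
  · intro hy
    rcases List.mem_append.mp hy with h1 | h2
    · exact Or.inr (List.mem_of_mem_take h1)
    · rcases List.mem_cons.mp h2 with h3 | h4
      · exact Or.inl h3
      · exact Or.inr (List.mem_of_mem_drop h4)
  · intro hy
    rcases hy with rfl | hy
    · exact List.mem_append.mpr (Or.inr (List.mem_cons_self))
    · have := (List.take_append_drop 1 xs) ▸ hy
      rcases List.mem_append.mp this with h1 | h2
      · exact List.mem_append.mpr (Or.inl h1)
      · exact List.mem_append.mpr (Or.inr (List.mem_cons_of_mem _ h2))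

-- A's loop: final answer stays nonempty, and its members are the initial ones plus pvKeep
theorem loopA_mem (lenght : Int) (array : List Int) :
    ∀ (temp : Int) (ans : List Int), ans ≠ [] →
      (let r := array.foldl
          (fun (st : Int × List Int) x =>
            if x ≤ lenght ∧ st.1 ≤ x then (x, PySem.List.insert st.2 1 x) else st)
          (temp, ans)
       r.2 ≠ [] ∧ ∀ y, y ∈ r.2 ↔ y ∈ ans ∨ y ∈ pvKeep temp (array.filter (fun v => decide (v ≤ lenght)))) := by
  induction array with
  | nil => intro temp ans hne; exact ⟨hne, by simp [pvKeep]⟩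
  | cons x t ih =>
    intro temp ans hne
    simp only [List.foldl_cons, List.filter_cons]
    by_cases hle : x ≤ lenght
    · by_cases hge : temp ≤ x
      · simp only [hle, hge, and_self, if_pos, decide_true]
        have hne' : PySem.List.insert ans (1 : Int) x ≠ [] := by
          intro hcontra
          have := (mem_insert_one ans x x hne).mpr (Or.inl rfl)
          rw [hcontra] at this; simp at this
        obtain ⟨h1, h2⟩ := ih x (PySem.List.insert ans (1:Int) x) hne'
        refine ⟨h1, fun y => ?_⟩
        rw [h2 y, mem_insert_one ans x y hne, pvKeep, if_pos hge]
        simp only [List.mem_cons]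
        tauto
      · simp only [hle, hge, and_false, if_false, decide_true, if_true]
        obtain ⟨h1, h2⟩ := ih temp ans hne
        refine ⟨h1, fun y => ?_⟩
        rw [h2 y, pvKeep, if_neg hge]
    · simp only [hle, false_and, if_false, decide_false]
      exact ih temp ans hne

-- B's kept list has exactly the members of pvKeep 0 f
theorem mem_keepsB (f : List Int) (z : Int) :
    z ∈ ((PySem.List.enumerate f).filter
        (fun p => decide (0 ≤ p.2) && decide (∀ y ∈ f.take p.1.toNat, y ≤ p.2))).map Prod.snd
      ↔ z ∈ pvKeep 0 f := by
  rw [mem_pvKeep]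
  simp only [List.mem_map, List.mem_filter, PySem.List.mem_enumerate_iff]
  constructor
  · rintro ⟨⟨i, x⟩, ⟨⟨k, hk, hpk⟩, hcond⟩, rfl⟩
    simp only [Prod.mk.injEq] at hpk
    obtain ⟨rfl, rfl⟩ := hpk
    simp only [Bool.and_eq_true, decide_eq_true_eq] at hcond
    refine ⟨k, hk, rfl, hcond.1, ?_⟩
    have : ((0 : Int) + (k : Int)).toNat = k := by omega
    simpa [this] using hcond.2
  · rintro ⟨i, h, rfl, h0, hpre⟩
    refine ⟨((0 : Int) + (i : Int), f[i]), ⟨⟨i, h, rfl⟩, ?_⟩, rfl⟩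
    simp only [Bool.and_eq_true, decide_eq_true_eq]
    have hti : ((0 : Int) + (i : Int)).toNat = i := by omega
    exact ⟨h0, by simpa [hti] using hpre⟩

-- ===== VERDICT (by name: the statement is the Claim_ definition above) =====
theorem clear_array_spec : Claim_equal_clear_array := by
  intro array lenght _
  unfold Spec_clear_array clear_array clear_array_alt
  obtain ⟨hne, hmem⟩ := loopA_mem lenght array 0 [0, lenght] (by simp)
  apply PySem.List.sorted_eq_sorted_of_perm
  · intro a b hab; exact hab
  · rw [List.perm_ext_iff_of_nodup (PySem.Set.nodup_ofList _)
        (PySem.Set.nodup_union _ _ (PySem.Set.nodup_ofList _))]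
    intro y
    rw [PySem.Set.mem_ofList, PySem.Set.mem_union, PySem.Set.mem_ofList,
        hmem y, mem_keepsB]
    simp only [List.mem_cons]
    tauto
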